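-- pv_equiv track=rewrite | github.com/mrigankpawagi/ProbeableProblems | code/q1/buggy/22_1.py | least_positive_index
-- ===== SOURCE A (Python) =====
-- def least_positive_index(nums):
--     positive_nums = [num for num in nums if num > 0]
--
--     if positive_nums:
--         min_positive = min(positive_nums)
--         min_positive_index = nums.index(min_positive)
--
--         repeating_indices = [i for i, num in enumerate(nums) if num == min_positive]
--
--         return min_positive_index, repeating_indices
--     else:
--         return -1, []
-- ===== SOURCE B (Python) =====
-- def least_positive_index(nums):
--     best = None
--     indices = []
--     for i, num in enumerate(nums):
--         if num > 0:
--             if best is None or num < best: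
--                 best = num
--                 indices = [i]
--             elif num == best:
--                 indices.append(i)
--     if best is None:
--         return -1, []
--     return indices[0], indices
-- ===== Notes on version B (the rewrite author's own statement) =====
-- stated objective: simpler
-- what changed: Replaces A's four passes (filter, min, index, enumerate-filter) with a single loop over enumerate(nums) maintaining the current min positive and its index list.
import Mathlib
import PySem

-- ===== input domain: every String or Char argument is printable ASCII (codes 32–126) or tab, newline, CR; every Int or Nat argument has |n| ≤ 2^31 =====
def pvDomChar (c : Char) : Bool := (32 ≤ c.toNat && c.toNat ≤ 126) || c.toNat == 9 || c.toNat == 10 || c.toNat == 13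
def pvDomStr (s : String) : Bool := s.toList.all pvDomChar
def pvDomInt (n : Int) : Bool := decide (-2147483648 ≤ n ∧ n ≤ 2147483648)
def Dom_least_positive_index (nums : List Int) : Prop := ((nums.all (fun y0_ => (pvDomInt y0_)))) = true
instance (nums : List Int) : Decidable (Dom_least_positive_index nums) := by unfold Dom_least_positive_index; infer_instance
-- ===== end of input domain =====

-- B replaces A's four separate passes (filter, min, index, enumerate-filter) by one
-- loop over enumerate(nums) maintaining the current min positive and its index list (simpler).


-- ===== PORT A =====
def least_positive_index (nums : List Int) : Int × List Int :=
  let positive_nums := nums.filter (fun num => decide (0 < num))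
  if positive_nums ≠ [] then
    match PySem.List.min? positive_nums (fun x => x) with
    | some min_positive =>
      let min_positive_index : Int := ((PySem.List.index? nums min_positive).getD 0 : Nat)
      let repeating_indices :=
        ((PySem.List.enumerate nums).filter (fun p => decide (p.2 = min_positive))).map (·.1)
      (min_positive_index, repeating_indices)
    | none => (-1, [])  -- unreachable: positive_nums ≠ []
  else
    (-1, [])

-- ===== PORT B =====
-- loop body of B: state = (current min positive or None, its occurrence indices)
def lpiStep (st : Option Int × List Int) (p : Int × Int) : Option Int × List Int :=
  if 0 < p.2 then
    match st.1 with
    | none => (some p.2, [p.1])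
    | some b =>
      if p.2 < b then (some p.2, [p.1])
      else if p.2 = b then (some b, st.2 ++ [p.1])
      else st
  else st

def least_positive_index_alt (nums : List Int) : Int × List Int :=
  match (PySem.List.enumerate nums).foldl lpiStep (none, []) with
  | (none, _) => (-1, [])
  | (some _, indices) => (indices.headD 0, indices)

-- ===== PRECONDITION & SPEC =====
def Spec_least_positive_index (nums : List Int) (out : Int × List Int) : Prop := out = least_positive_index_alt nums
instance (nums : List Int) (out : Int × List Int) : Decidable (Spec_least_positive_index nums out) := by unfold Spec_least_positive_index; infer_instance

-- ===== CLAIM (what is proved, stated in full; the proofs are below) =====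
def Claim_equal_least_positive_index : Prop := ∀ (nums : List Int), Dom_least_positive_index nums → Spec_least_positive_index nums (least_positive_index nums)

-- ===== LEMMAS AND PROOFS =====

-- indices (starting at s) of the occurrences of m in xs
def lpiOcc (xs : List Int) (s : Int) (m : Int) : List Int :=
  ((PySem.List.enumerate xs s).filter (fun p => decide (p.2 = m))).map (·.1)

theorem lpiOcc_append_single (xs : List Int) (s x m : Int) :
    lpiOcc (xs ++ [x]) s m
      = lpiOcc xs s m ++ (if x = m then [s + xs.length] else []) := by
  simp only [lpiOcc, PySem.List.enumerate_append, List.filter_append, List.map_append]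
  congr 1
  by_cases h : x = m <;> simp [PySem.List.enumerate, h]

theorem lpiOcc_nil_of_not_mem (xs : List Int) (s m : Int) (h : m ∉ xs) :
    lpiOcc xs s m = [] := by
  simp only [lpiOcc, List.map_eq_nil_iff, List.filter_eq_nil_iff]
  intro p hp
  obtain ⟨k, hk, rfl⟩ := (PySem.List.mem_enumerate_iff xs s p).mp hp
  simp only [decide_eq_true_eq]
  intro hpe
  exact h (hpe ▸ List.getElem_mem hk)

theorem lpi_fold_char (xs : List Int) (s : Int) :
    (PySem.List.enumerate xs s).foldl lpiStep (none, []) =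
      match PySem.List.min? (xs.filter (fun n => decide (0 < n))) (fun x => x) with
      | none => (none, [])
      | some m => (some m, lpiOcc xs s m) := by
  induction xs using List.reverseRecOn generalizing s with
  | nil => simp [PySem.List.enumerate, PySem.List.min?]
  | append_singleton xs x ih =>
    rw [PySem.List.enumerate_append, List.foldl_append, ih s]
    simp only [PySem.List.enumerate, List.foldl_cons, List.foldl_nil, List.filter_append,
      List.filter_cons, List.filter_nil]
    by_cases hx : 0 < x
    · simp only [hx, decide_true, if_true]
      cases hmin : PySem.List.min? (xs.filter (fun n => decide (0 < n))) (fun x => x) with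
      | none =>
        -- no positives in xs yet
        have hfil : xs.filter (fun n => decide (0 < n)) = [] :=
          (PySem.List.min?_eq_none_iff _ _).mp hmin
        have hnm : x ∉ xs := by
          intro hmem
          have : x ∈ xs.filter (fun n => decide (0 < n)) := by
            simp [List.mem_filter, hmem, hx]
          simp [hfil] at this
        have h1 : PySem.List.min? [x] (fun y => y) = some x := by
          rw [show ([x] : List Int) = x :: [] from rfl, PySem.List.min?_id_cons]; rfl
        rw [hfil, List.nil_append, h1]
        simp [lpiStep, hx, lpiOcc_append_single, lpiOcc_nil_of_not_mem xs s x hnm]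
      | some b =>
        have hbmem := PySem.List.min?_mem hmin
        have hbpos : (0:Int) < b := by
          have := List.of_mem_filter hbmem
          simpa using this
        have hbmin : ∀ y ∈ xs.filter (fun n => decide (0 < n)), b ≤ y :=
          PySem.List.min?_isMin hmin
        obtain ⟨h0, t, hft⟩ : ∃ h0 t, xs.filter (fun n => decide (0 < n)) = h0 :: t := by
          cases hf : xs.filter (fun n => decide (0 < n)) with
          | nil => rw [(PySem.List.min?_eq_none_iff _ _).mpr hf] at hmin; simp at hmin
          | cons a l => exact ⟨a, l, rfl⟩
        have hb' : t.foldl min h0 = b := by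
          have h2 := hmin
          rw [hft, PySem.List.min?_id_cons] at h2
          exact Option.some.inj h2
        have hmin2 : PySem.List.min? (xs.filter (fun n => decide (0 < n)) ++ [x]) (fun y => y)
            = some (min b x) := by
          rw [hft, List.cons_append, PySem.List.min?_id_cons, List.foldl_append]
          simp [hb']
        rw [hmin2]
        rcases lt_trichotomy x b with hlt | heq | hgt
        · -- new strict min resets the list
          have hnm : x ∉ xs := by
            intro hmem
            have hmf : x ∈ xs.filter (fun n => decide (0 < n)) := by
              simp [List.mem_filter, hmem, hx]
            have := hbmin x hmf
            omega
          rw [min_eq_right hlt.le]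
          simp [lpiStep, hx, hlt, lpiOcc_append_single, lpiOcc_nil_of_not_mem xs s x hnm]
        · subst heq
          rw [min_self]
          simp [lpiStep, hx, lpiOcc_append_single]
        · have hne : x ≠ b := by omega
          rw [min_eq_left hgt.le]
          simp [lpiStep, hx, hne, not_lt_of_gt hgt, lpiOcc_append_single]
    · -- x not positive: state and min of positives both unchanged
      simp only [hx, decide_false, Bool.false_eq_true, if_false, List.append_nil]
      cases hmin : PySem.List.min? (xs.filter (fun n => decide (0 < n))) (fun x => x) with
      | none => simp [lpiStep, hx]
      | some b =>
        have hbpos : (0:Int) < b := by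
          have := List.of_mem_filter (PySem.List.min?_mem hmin)
          simpa using this
        have hne : x ≠ b := by omega
        simp [lpiStep, hx, hne, lpiOcc_append_single]

theorem lpi_head (xs : List Int) (s m : Int) (h : m ∈ xs) :
    ∃ (k : Nat) (t : List Int),
      PySem.List.index? xs m = some k ∧ lpiOcc xs s m = (s + (k : Int)) :: t := by
  induction xs generalizing s with
  | nil => simp at h
  | cons a xs ih =>
    by_cases hax : a = m
    · subst hax
      refine ⟨0, lpiOcc xs (s + 1) a, PySem.List.index?_cons_self .., ?_⟩
      simp [lpiOcc, PySem.List.enumerate_cons]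
    · have hm : m ∈ xs := by
        rcases List.mem_cons.mp h with h1 | h1
        · exact absurd h1.symm hax
        · exact h1
      obtain ⟨k, t, hk, ht⟩ := ih (s + 1) hm
      refine ⟨k + 1, t, ?_, ?_⟩
      · rw [PySem.List.index?_cons_of_ne _ hax, hk]; rfl
      · have hocc : lpiOcc (a :: xs) s m = lpiOcc xs (s + 1) m := by
          simp [lpiOcc, PySem.List.enumerate_cons, hax]
        rw [hocc, ht]
        congr 1
        push_cast
        ring

-- ===== VERDICT (by name: the statement is the Claim_ definition above) =====
theorem least_positive_index_spec : Claim_equal_least_positive_index := by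
  intro nums _
  unfold Spec_least_positive_index least_positive_index least_positive_index_alt
  rw [lpi_fold_char nums 0]
  cases hmin : PySem.List.min? (nums.filter (fun n => decide (0 < n))) (fun x => x) with
  | none =>
    have hfil : nums.filter (fun n => decide (0 < n)) = [] :=
      (PySem.List.min?_eq_none_iff _ _).mp hmin
    simp [hfil]
  | some m =>
    have hfil : nums.filter (fun n => decide (0 < n)) ≠ [] := by
      intro h
      rw [(PySem.List.min?_eq_none_iff _ _).mpr h] at hmin
      simp at hmin
    have hmem : m ∈ nums := List.mem_of_mem_filter (PySem.List.min?_mem hmin)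
    obtain ⟨k, t, hk, ht⟩ := lpi_head nums 0 m hmem
    simp only [hfil, if_true, ne_eq, not_false_iff, hmin]
    have hmap : List.map (fun x => x.1)
        (List.filter (fun p => decide (p.2 = m)) (PySem.List.enumerate nums)) = lpiOcc nums 0 m := rfl
    rw [hmap, hk, ht]
    simp
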